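-- pv_equiv track=rewrite | github.com/qig123/cs61a | reading_code/ch1/hog_cp.py | free_bacon
-- ===== SOURCE A (Python) =====
-- def free_bacon(score):
--     """Return the points scored from rolling 0 dice (Free Bacon).
--
--     score:  The opponent's current score.
--     """
--     assert score < 100, 'The game should be over.'
--     # BEGIN PROBLEM 2
--     "*** YOUR CODE HERE ***"
--     n = 0
--     sum = score*score*score
--     while(sum != 0):
--         sum = sum//10
--         n += 1
--     sum = score*score*score
--     first_op = 0
--     if(n % 2 == 0):
--         first_op = 1
--     k = 0
--     result = 0
--     while(sum != 0):
--         if(first_op == 1):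
--             if(k % 2 == 0):
--                 num = 0-sum % 10
--             else:
--                 num = sum % 10
--         else:
--             if(k % 2 == 0):
--                 num = sum % 10
--             else:
--                 num = 0-sum % 10
--         result = result+num
--         k = k+1
--         sum = sum//10
--     return 1+abs(result)
-- ===== SOURCE B (Python) =====
-- def free_bacon(score):
--     """Return the points scored from rolling 0 dice (Free Bacon).
--
--     score:  The opponent's current score.
--     """
--     assert score < 100, 'The game should be over.'
--     total = 0
--     for i, d in enumerate(str(score ** 3)):
--         total += int(d) if i % 2 == 0 else -int(d)
--     return 1 + abs(total)
-- ===== Notes on version B (the rewrite author's own statement) =====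
-- stated objective: simpler
-- what changed: Replaces A's two LSB-first //10 loops (one to count digits, one to sign terms by the digit-count parity) with a single MSB-first pass over str(score**3) signing each digit by its string index.
-- outside the precondition, e.g. on free_bacon(100): A raises AssertionError, B raises AssertionError; on free_bacon(-1): A does not finish within the time limit, B raises ValueError
import Mathlib
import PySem

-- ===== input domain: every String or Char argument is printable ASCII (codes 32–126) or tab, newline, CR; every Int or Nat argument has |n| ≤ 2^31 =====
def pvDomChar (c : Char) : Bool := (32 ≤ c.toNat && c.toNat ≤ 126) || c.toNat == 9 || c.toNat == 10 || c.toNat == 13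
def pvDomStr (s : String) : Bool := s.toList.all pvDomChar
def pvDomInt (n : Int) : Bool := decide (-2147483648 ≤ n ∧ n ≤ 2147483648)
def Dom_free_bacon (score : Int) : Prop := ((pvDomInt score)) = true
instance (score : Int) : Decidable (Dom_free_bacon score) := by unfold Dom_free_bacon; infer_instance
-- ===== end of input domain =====

-- B computes the same Free Bacon value with one MSB-first pass over str(score**3),
-- signing digits by string index, instead of A's two LSB-first //10 loops (objective: simpler).
-- Pre_ excludes score >= 100 (A's assert raises AssertionError) and score < 0 (A's first while loop never terminates).


-- ===== PORT A =====
-- while(sum != 0): sum = sum//10; n += 1   — fuel natAbs sum + 1 dominates the iteration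
-- count for every nonnegative sum (the only ones Pre_ admits; Python diverges on negatives).
def fbCountLoop : Nat → Int → Int → Int
  | 0, _, n => n
  | fuel+1, sum, n =>
    if sum ≠ 0 then fbCountLoop fuel (PySem.Int.floordiv sum 10) (n + 1) else n

-- the second while loop, threading (sum, k, result); same fuel bound.
def fbSumLoop : Nat → Int → Int → Int → Int → Int
  | 0, _, _, _, result => result
  | fuel+1, sum, first_op, k, result =>
    if sum ≠ 0 then
      let num :=
        if first_op == 1 then
          (if PySem.Int.mod k 2 == 0 then 0 - PySem.Int.mod sum 10 else PySem.Int.mod sum 10)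
        else
          (if PySem.Int.mod k 2 == 0 then PySem.Int.mod sum 10 else 0 - PySem.Int.mod sum 10)
      fbSumLoop fuel (PySem.Int.floordiv sum 10) first_op (k + 1) (result + num)
    else result

-- the assert (score < 100) raises where it fails; those inputs are outside Pre_free_bacon.
def free_bacon (score : Int) : Int :=
  let sum := score * score * score
  let n := fbCountLoop (sum.natAbs + 1) sum 0
  let first_op : Int := if PySem.Int.mod n 2 == 0 then 1 else 0
  let result := fbSumLoop (sum.natAbs + 1) sum first_op 0 0
  1 + |result|

-- ===== PORT B =====
-- int(d) for the single digit character d: exact value (d - '0'); on every admitted input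
-- score**3 ≥ 0 so each character of str(score**3) is a decimal digit.
def fbDigitVal (d : Char) : Int := (d.toNat : Int) - 48

def free_bacon_alt (score : Int) : Int :=
  let total := (PySem.List.enumerate (PySem.Int.toChars (score ^ 3))).foldl
    (fun acc p => acc + (if PySem.Int.mod p.1 2 == 0 then fbDigitVal p.2 else -(fbDigitVal p.2))) 0
  1 + |total|

-- ===== PRECONDITION & SPEC =====
-- Pre_: exactly the inputs on which A returns — score ≥ 100 fails A's assert (AssertionError),
-- and for score < 0 A's first while loop never terminates.
def Pre_free_bacon (score : Int) : Prop := 0 ≤ score ∧ score < 100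
instance (score : Int) : Decidable (Pre_free_bacon score) := by unfold Pre_free_bacon; infer_instance
def pvWitness_free_bacon : Int := 35

def Spec_free_bacon (score : Int) (out : Int) : Prop := out = free_bacon_alt score
instance (score : Int) (out : Int) : Decidable (Spec_free_bacon score out) := by unfold Spec_free_bacon; infer_instance

-- ===== CLAIM (what is proved, stated in full; the proofs are below) =====
def Claim_equal_free_bacon : Prop := ∀ (score : Int), Dom_free_bacon score → Pre_free_bacon score → Spec_free_bacon score (free_bacon score)

-- ===== LEMMAS AND PROOFS =====
-- Only 100 inputs satisfy Pre_: check them all by kernel evaluation.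
theorem fb_agree_lt_100 : ∀ n : Nat, n < 100 → free_bacon (n : Int) = free_bacon_alt (n : Int) := by decide

-- ===== VERDICT (by name: the statement is the Claim_ definition above) =====
theorem free_bacon_spec : Claim_equal_free_bacon := by
  intro score _ hpre
  unfold Spec_free_bacon
  obtain ⟨h0, h1⟩ := hpre
  have h := fb_agree_lt_100 score.toNat (by omega)
  rwa [Int.toNat_of_nonneg h0] at h
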